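-- pv_equiv track=rewrite | github.com/jerry609/PaperBot | src/paperbot/infrastructure/swarm/sandbox_tool_executor.py | _compress_install_output
-- ===== SOURCE A (Python) =====
-- from typing import TYPE_CHECKING, Any, Dict, List, Optional
--
-- def _compress_install_output(output: str) -> str:
--     lines = output.splitlines()
--     kept: List[str] = []
--     for line in lines:
--         lower = line.lower().strip()
--         if any(
--             kw in lower
--             for kw in (
--                 "successfully installed", "already satisfied", "error",
--                 "failed", "not found", "installed", "collecting", "warning",
--             )
--         ):
--             kept.append(line)
--     if not kept:
--         return "(install completed, no notable output)"
--     return "\n".join(kept[-20:])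
-- ===== SOURCE B (Python) =====
-- from typing import List
--
-- _KEYWORDS = (
--     "successfully installed", "already satisfied", "error",
--     "failed", "not found", "installed", "collecting", "warning",
-- )
--
--
-- def _compress_install_output(output: str) -> str:
--     buf: List[str] = []
--     for line in reversed(output.splitlines()):
--         low = line.lower().strip()
--         if any(kw in low for kw in _KEYWORDS):
--             buf.append(line)
--             if len(buf) == 20:
--                 break
--     if not buf:
--         return "(install completed, no notable output)"
--     buf.reverse()
--     return "\n".join(buf)
-- ===== Notes on version B (the rewrite author's own statement) =====
-- stated objective: alternative
-- what changed: Scans the lines in reverse, collecting matches into a buffer and breaking as soon as 20 are found, then reverses the buffer and joins; A filters every line into a list and slices its last 20 afterwards.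
import Mathlib
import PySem

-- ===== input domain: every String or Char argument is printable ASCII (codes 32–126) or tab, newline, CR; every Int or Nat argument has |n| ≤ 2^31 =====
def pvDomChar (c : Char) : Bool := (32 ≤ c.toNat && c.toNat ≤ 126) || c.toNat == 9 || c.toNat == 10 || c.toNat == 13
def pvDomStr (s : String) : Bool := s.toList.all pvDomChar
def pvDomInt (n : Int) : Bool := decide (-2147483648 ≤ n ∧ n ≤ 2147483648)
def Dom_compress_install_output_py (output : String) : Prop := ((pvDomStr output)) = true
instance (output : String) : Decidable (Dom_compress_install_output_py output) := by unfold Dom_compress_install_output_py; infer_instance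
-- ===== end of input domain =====

-- B scans the lines in reverse and stops after collecting 20 matches, instead of
-- filtering all lines and slicing the last 20 afterwards (alternative decomposition).

-- ===== PORT A =====
def pvKeywords : List String :=
  ["successfully installed", "already satisfied", "error",
   "failed", "not found", "installed", "collecting", "warning"]

def pvKeep (line : String) : Bool :=
  let lower := PySem.Str.strip (PySem.Str.lower line)
  pvKeywords.any (fun kw => PySem.Str.isIn kw lower)

def compress_install_output_py (output : String) : String :=
  let lines := PySem.Str.splitlines output
  let kept := lines.foldl (fun kept line => if pvKeep line then kept ++ [line] else kept) []
  if kept = [] then "(install completed, no notable output)"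
  else PySem.Str.join "\n" (PySem.List.slice kept (some (-20)) none)

-- ===== PORT B =====
-- reversed-scan with early break at 20 collected matches
def pvCollect : List String → List String → List String
  | [], buf => buf
  | l :: rest, buf =>
    if pvKeep l then
      let buf' := buf ++ [l]
      if buf'.length = 20 then buf' else pvCollect rest buf'
    else pvCollect rest buf

def compress_install_output_py_alt (output : String) : String :=
  let buf := pvCollect (PySem.Str.splitlines output).reverse []
  if buf = [] then "(install completed, no notable output)"
  else PySem.Str.join "\n" buf.reverse

-- ===== PRECONDITION & SPEC =====
def Spec_compress_install_output_py (output : String) (out : String) : Prop := out = compress_install_output_py_alt output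
instance (output : String) (out : String) : Decidable (Spec_compress_install_output_py output out) := by unfold Spec_compress_install_output_py; infer_instance

-- ===== CLAIM (what is proved, stated in full; the proofs are below) =====
def Claim_equal_compress_install_output_py : Prop := ∀ (output : String), Dom_compress_install_output_py output → Spec_compress_install_output_py output (compress_install_output_py output)

-- ===== LEMMAS AND PROOFS =====

-- A's accumulator loop is List.filter
theorem pv_foldl_filter (ls : List String) (acc : List String) :
    ls.foldl (fun kept line => if pvKeep line then kept ++ [line] else kept) acc
      = acc ++ ls.filter pvKeep := by
  induction ls generalizing acc with
  | nil => simp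
  | cons l rest ih =>
    by_cases h : pvKeep l <;> simp [List.foldl_cons, h, ih]

-- B's loop collects the first 20 matches (buffer not yet full)
theorem pv_collect_eq (ls : List String) (buf : List String) (h : buf.length < 20) :
    pvCollect ls buf = buf ++ (ls.filter pvKeep).take (20 - buf.length) := by
  induction ls generalizing buf with
  | nil => simp [pvCollect]
  | cons l rest ih =>
    rw [pvCollect]
    by_cases hk : pvKeep l
    · rw [if_pos hk]
      by_cases hfull : (buf ++ [l]).length = 20
      · rw [if_pos hfull]
        have h1 : 20 - buf.length = 1 := by simp at hfull; omega
        simp [hk, h1]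
      · rw [if_neg hfull]
        rw [ih (buf ++ [l]) (by simp at hfull ⊢; omega)]
        have h2 : 20 - (buf ++ [l]).length = 20 - buf.length - 1 := by simp; omega
        have h3 : 20 - buf.length = (20 - buf.length - 1) + 1 := by
          simp at hfull; omega
        simp only [List.filter_cons, hk, if_true, h2, List.append_assoc]
        rw [h3, List.take_succ_cons]
        simp
    · rw [if_neg hk, ih buf h]
      simp [hk]

theorem pv_rev_take_rev (xs : List String) :
    (xs.reverse.take 20).reverse = xs.drop (xs.length - 20) := by
  rw [List.take_reverse, List.reverse_reverse]

-- ===== VERDICT (by name: the statement is the Claim_ definition above) =====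
theorem compress_install_output_py_spec : Claim_equal_compress_install_output_py := by
  intro output _
  unfold Spec_compress_install_output_py compress_install_output_py compress_install_output_py_alt
  simp only
  set ls := PySem.Str.splitlines output with hls
  rw [pv_foldl_filter, pv_collect_eq _ _ (by simp)]
  simp only [List.nil_append, List.length_nil, Nat.sub_zero, List.filter_reverse]
  set kept := ls.filter pvKeep with hkept
  by_cases hk : kept = []
  · simp [hk]
  · have hne : ¬ (kept.reverse.take 20 = []) := by
      simp [List.take_eq_nil_iff, hk]
    rw [if_neg hk, if_neg hne, pv_rev_take_rev]
    rw [PySem.List.slice_from_neg_ofNat kept 20 (by omega)]
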